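-- pv_equiv track=rewrite | github.com/rachit1994/ai-agent-generator | src/success_criteria/extended_binary_gates/surface.py | _normalized_references
-- ===== SOURCE A (Python) =====
-- def _normalized_references(modules: object) -> list[str]:
--     if not isinstance(modules, list):
--         return []
--     out: list[str] = []
--     seen: set[str] = set()
--     for item in modules:
--         if not isinstance(item, str):
--             return []
--         ref = item.strip()
--         if not ref:
--             return []
--         if ref in seen:
--             return []
--         seen.add(ref)
--         out.append(ref)
--     return out
-- ===== SOURCE B (Python) =====
-- def _normalized_references(modules: object) -> list[str]:
--     if not isinstance(modules, list):
--         return []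
--     if not all(isinstance(x, str) for x in modules):
--         return []
--     refs = [x.strip() for x in modules]
--     if any(not r for r in refs):
--         return []
--     if len(set(refs)) != len(refs):
--         return []
--     return refs
-- ===== Notes on version B (the rewrite author's own statement) =====
-- stated objective: simpler
-- what changed: Replaced the single fused loop with incremental seen-set bookkeeping by independent validation passes: strip all items, reject any empty, reject duplicates via a set-size comparison, else return the stripped list.
import Mathlib
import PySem

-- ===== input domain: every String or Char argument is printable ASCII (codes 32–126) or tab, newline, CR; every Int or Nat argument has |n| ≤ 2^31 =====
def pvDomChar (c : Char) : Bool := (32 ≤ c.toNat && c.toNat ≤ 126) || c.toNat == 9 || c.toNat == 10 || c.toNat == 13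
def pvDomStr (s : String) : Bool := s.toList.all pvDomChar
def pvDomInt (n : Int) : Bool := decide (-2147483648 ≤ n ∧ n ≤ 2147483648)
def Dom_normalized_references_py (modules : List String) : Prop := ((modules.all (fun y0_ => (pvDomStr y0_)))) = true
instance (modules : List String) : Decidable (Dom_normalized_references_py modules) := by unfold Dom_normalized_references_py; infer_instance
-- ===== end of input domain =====

-- B replaces A's fused loop with independent validation passes (strip all, check empties, check duplicates by set size); objective: simpler.


-- ===== PORT A =====
-- A's for-loop over `modules` with the `seen` set and the `out` accumulator
def normARefLoop (items : List String) (seen : PySem.Set String) (out : List String) : List String :=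
  match items with
  | [] => out
  | item :: rest =>
    let ref := PySem.Str.strip item
    if ref = "" then []
    else if PySem.Set.contains seen ref then []
    else normARefLoop rest (PySem.Set.add seen ref) (out ++ [ref])

def normalized_references_py (modules : List String) : List String :=
  normARefLoop modules PySem.Set.empty []

-- ===== PORT B =====
def normalized_references_py_alt (modules : List String) : List String :=
  let refs := modules.map PySem.Str.strip
  if refs.any (fun r => r = "") then []
  else if PySem.Set.len (PySem.Set.ofList refs) ≠ (refs.length : Int) then []
  else refs

-- ===== PRECONDITION & SPEC =====
def Spec_normalized_references_py (modules : List String) (out : List String) : Prop := out = normalized_references_py_alt modules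
instance (modules : List String) (out : List String) : Decidable (Spec_normalized_references_py modules out) := by unfold Spec_normalized_references_py; infer_instance

-- ===== CLAIM (what is proved, stated in full; the proofs are below) =====
def Claim_equal_normalized_references_py : Prop := ∀ (modules : List String), Dom_normalized_references_py modules → Spec_normalized_references_py modules (normalized_references_py modules)

-- ===== LEMMAS AND PROOFS =====

theorem add_of_not_mem {s : PySem.Set String} {x : String} (h : x ∉ s) :
    PySem.Set.add s x = s ++ [x] := by
  simp [PySem.Set.add, h]

theorem add_of_mem {s : PySem.Set String} {x : String} (h : x ∈ s) :
    PySem.Set.add s x = s := by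
  simp [PySem.Set.add, h]

theorem length_add_le (s : PySem.Set String) (x : String) :
    (PySem.Set.add s x).length ≤ s.length + 1 := by
  simp only [PySem.Set.add]
  split_ifs <;> simp

-- length of foldl add grows strictly less than the number of elements fed in when a duplicate exists
theorem foldl_add_length_lt (xs : List String) : ∀ (s : PySem.Set String), s.Nodup →
    ¬ (s ++ xs).Nodup → (xs.foldl PySem.Set.add s).length < s.length + xs.length := by
  induction xs with
  | nil => intro s hs hnd; simp at hnd; exact absurd hs hnd
  | cons x xs ih =>
    intro s hs hnd
    by_cases hx : x ∈ s
    · have hle : (xs.foldl PySem.Set.add s).length ≤ s.length + xs.length := by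
        clear hnd hs ih hx
        induction xs generalizing s with
        | nil => simp
        | cons y ys ih2 =>
          simp only [List.foldl_cons]
          have h1 := ih2 (PySem.Set.add s y)
          have h2 := length_add_le s y
          simp only [List.length_cons]
          omega
      simp only [List.foldl_cons, add_of_mem hx, List.length_cons]
      omega
    · have hadd := add_of_not_mem hx
      have hnd' : ¬ ((s ++ [x]) ++ xs).Nodup := by
        intro h; apply hnd; simpa using h
      have hs' : (s ++ [x]).Nodup := by
        simp only [List.nodup_append]
        exact ⟨hs, by simp, by intro a ha b hb; simp at hb; subst hb; exact fun h => hx (h ▸ ha)⟩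
      have := ih (s ++ [x]) hs' hnd'
      simp only [List.foldl_cons, hadd, List.length_cons]
      simp only [List.length_append, List.length_cons, List.length_nil] at this
      omega

theorem length_ofList_eq_iff (xs : List String) :
    (PySem.Set.ofList xs).length = xs.length ↔ xs.Nodup := by
  constructor
  · intro h
    by_contra hnd
    have := foldl_add_length_lt xs [] (by simp) (by simpa using hnd)
    rw [← PySem.Set.ofList_eq_foldl] at this
    simp only [List.length_nil, Nat.zero_add] at this
    omega
  · intro h; rw [PySem.Set.ofList_eq_self_of_nodup xs h]

-- characterization of A's loop
theorem normARefLoop_eq (items : List String) : ∀ (seen out : List String), seen.Nodup →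
    normARefLoop items seen out =
      if (items.map PySem.Str.strip).any (fun r => r = "") then []
      else if (seen ++ items.map PySem.Str.strip).Nodup then out ++ items.map PySem.Str.strip
      else [] := by
  induction items with
  | nil => intro seen out hs; simp [normARefLoop, hs]
  | cons item rest ih =>
    intro seen out hs
    by_cases he : PySem.Str.strip item = ""
    · simp [normARefLoop, he]
    · simp only [normARefLoop, List.map_cons, List.any_cons]
      simp only [he, if_false, decide_false, Bool.false_or]
      by_cases hc : PySem.Str.strip item ∈ seen
      · have : PySem.Set.contains seen (PySem.Str.strip item) = true :=
          (PySem.Set.contains_iff _ _).mpr hc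
        rw [this]
        have hnd : ¬ (seen ++ PySem.Str.strip item :: rest.map PySem.Str.strip).Nodup := by
          intro h
          rcases List.nodup_append.mp h with ⟨_, _, hdisj⟩
          exact hdisj _ hc _ List.mem_cons_self rfl
        simp [hnd]
      · have : PySem.Set.contains seen (PySem.Str.strip item) = false := by
          by_contra h
          exact hc ((PySem.Set.contains_iff _ _).mp (by simpa using h))
        rw [this]
        simp only [Bool.false_eq_true, if_false]
        rw [add_of_not_mem hc]
        rw [ih (seen ++ [PySem.Str.strip item]) (out ++ [PySem.Str.strip item])
            (by
              simp only [List.nodup_append]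
              exact ⟨hs, by simp, by
                intro a ha b hb; simp at hb; subst hb; exact fun h => hc (h ▸ ha)⟩)]
        have hassoc : (seen ++ [PySem.Str.strip item]) ++ rest.map PySem.Str.strip
            = seen ++ PySem.Str.strip item :: rest.map PySem.Str.strip := by simp
        rw [hassoc]
        split_ifs with h1 h2 <;> simp

-- ===== VERDICT (by name: the statement is the Claim_ definition above) =====
theorem normalized_references_py_spec : Claim_equal_normalized_references_py := by
  intro modules _
  unfold Spec_normalized_references_py normalized_references_py normalized_references_py_alt
  rw [normARefLoop_eq modules PySem.Set.empty [] (by simp [PySem.Set.empty])]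
  simp only [PySem.Set.empty, List.nil_append, List.length_map]
  by_cases hany : (modules.map PySem.Str.strip).any (fun r => r = "")
  · simp [hany]
  · simp only [hany, if_false, Bool.false_eq_true]
    by_cases hnd : (modules.map PySem.Str.strip).Nodup
    · have hlen : (PySem.Set.ofList (modules.map PySem.Str.strip)).length
          = (modules.map PySem.Str.strip).length := (length_ofList_eq_iff _).mpr hnd
      simp [hnd, PySem.Set.len, hlen]
    · have hlen : (PySem.Set.ofList (modules.map PySem.Str.strip)).length ≠ modules.length := by
        intro h
        exact hnd ((length_ofList_eq_iff _).mp (by simp [h]))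
      simp [hnd, PySem.Set.len, hlen]
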